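-- pv_equiv track=rewrite | github.com/douyaAI/pyTools | scholar/parseWord.py | extract_ref
-- ===== SOURCE A (Python) =====
-- def getRef(words, j):
--     res = words[j]
--     j -= 1
--     while j >= 0:
--         firstChar = words[j][0]
--         if firstChar.isupper() or \
--             firstChar == '&' or \
--             (firstChar == '(' and '20' not in words[j] and '19' not in words[j]) or \
--             'al' in words[j] or \
--             'and' in words[j] or \
--             'et' in words[j]:
--             res = words[j] + ' ' + res;
--             j -= 1
--         else:
--             break
--
--     # clean
--     while not res[-1].isdigit():
--         res = res[:-1]
--     res = res.replace('(', '')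
--     res = res.replace('&', ',')
--     return res
--
-- def extract_ref(content):
--     words = content.split()
--     refList = []
--     for i in range(len(words)):
--         word = words[i]
--         if '20' in word or '19' in word:
--             ref = getRef(words, i)
--             refList.append(ref)
--     return refList
-- ===== SOURCE B (Python) =====
-- def _qualifies(word):
--     first = word[0]
--     return (first.isupper() or first == '&'
--             or (first == '(' and '20' not in word and '19' not in word)
--             or 'al' in word or 'and' in word or 'et' in word)
--
--
-- def _clean(res):
--     while not res[-1].isdigit():
--         res = res[:-1]
--     return res.replace('(', '').replace('&', ',')
--
--
-- def extract_ref(content):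
--     refList = []
--     prefix = []
--     for word in content.split():
--         if '20' in word or '19' in word:
--             refList.append(_clean(' '.join(prefix + [word])))
--         prefix = prefix + [word] if _qualifies(word) else []
--     return refList
-- ===== Notes on version B (the rewrite author's own statement) =====
-- stated objective: alternative
-- what changed: Replaces the per-match backward walk over previous words (getRef) with a single forward pass that maintains the current run of qualifying words as a prefix buffer, emitting the joined reference when a year token is seen.
import Mathlib
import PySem

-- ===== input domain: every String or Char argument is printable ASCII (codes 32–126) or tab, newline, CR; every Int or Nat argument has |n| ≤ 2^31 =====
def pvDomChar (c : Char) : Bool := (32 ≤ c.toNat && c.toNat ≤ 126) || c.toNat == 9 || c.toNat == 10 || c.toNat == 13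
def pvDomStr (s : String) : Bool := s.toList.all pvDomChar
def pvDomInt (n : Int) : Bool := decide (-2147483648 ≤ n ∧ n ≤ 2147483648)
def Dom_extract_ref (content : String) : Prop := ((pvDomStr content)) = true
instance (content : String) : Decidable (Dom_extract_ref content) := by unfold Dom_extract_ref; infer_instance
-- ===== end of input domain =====

-- B replaces A's per-match backward walk (getRef) by a single forward pass that maintains
-- the current run of qualifying words as a prefix buffer (objective: alternative decomposition).

-- ===== PORT A =====
-- words are handled as List Char (code points); the final result is re-packed with String.mk.

-- the qualifying test of getRef, on words[j] (split words are nonempty, so the head default is unreachable)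
def pvQualA (w : List Char) : Bool :=
  let first := ((PySem.List.pyGet? w (0 : Int)).getD ' ')
  PySem.Chars.isupper first ||
  first == '&' ||
  (first == '(' && !PySem.Chars.isIn ['2','0'] w && !PySem.Chars.isIn ['1','9'] w) ||
  PySem.Chars.isIn ['a','l'] w ||
  PySem.Chars.isIn ['a','n','d'] w ||
  PySem.Chars.isIn ['e','t'] w

-- the backward while-loop of getRef: fuel j+1 means the loop variable is j
def pvGetRefLoopA (words : List (List Char)) : Nat → List Char → List Char
  | 0, res => res
  | j+1, res =>
    let w := (PySem.List.pyGet? words (j : Int)).getD []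
    if pvQualA w then pvGetRefLoopA words j (w ++ ' ' :: res) else res

-- the clean while-loop: drop trailing chars until the last one is a digit
-- (Python raises IndexError on the empty string; unreachable here since res contains a digit)
def pvCleanLoopA (res : List Char) : List Char :=
  if h : res = [] then []
  else if PySem.Chars.isdigit (res.getLast h) then res else pvCleanLoopA res.dropLast
termination_by res.length
decreasing_by
  have := List.length_pos_iff.mpr h
  simp [List.length_dropLast]; omega

def pvGetRefA (words : List (List Char)) (j : Nat) : List Char :=
  let res := (PySem.List.pyGet? words (j : Int)).getD []
  let res := pvCleanLoopA (pvGetRefLoopA words j res)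
  PySem.Chars.replace (PySem.Chars.replace res ['('] []) ['&'] [',']

def extract_ref (content : String) : List String :=
  let words := PySem.Chars.split₀ content.toList
  let refList := (PySem.List.pyRange 0 (words.length : Int) 1).foldl
    (fun acc i =>
      let word := (PySem.List.pyGet? words i).getD []
      if PySem.Chars.isIn ['2','0'] word || PySem.Chars.isIn ['1','9'] word then
        acc ++ [pvGetRefA words i.toNat]
      else acc) []
  refList.map String.mk

-- ===== PORT B =====

def pvQualB (word : List Char) : Bool :=
  let first := ((PySem.List.pyGet? word (0 : Int)).getD ' ')
  PySem.Chars.isupper first ||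
  first == '&' ||
  (first == '(' && !PySem.Chars.isIn ['2','0'] word && !PySem.Chars.isIn ['1','9'] word) ||
  PySem.Chars.isIn ['a','l'] word ||
  PySem.Chars.isIn ['a','n','d'] word ||
  PySem.Chars.isIn ['e','t'] word

def pvCleanB (res : List Char) : List Char :=
  if h : res = [] then PySem.Chars.replace (PySem.Chars.replace [] ['('] []) ['&'] [',']
  else if PySem.Chars.isdigit (res.getLast h) then
    PySem.Chars.replace (PySem.Chars.replace res ['('] []) ['&'] [',']
  else pvCleanB res.dropLast
termination_by res.length
decreasing_by
  have := List.length_pos_iff.mpr h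
  simp [List.length_dropLast]; omega

def extract_ref_alt (content : String) : List String :=
  let step := fun (st : List (List Char) × List (List Char)) (word : List Char) =>
    let refList :=
      if PySem.Chars.isIn ['2','0'] word || PySem.Chars.isIn ['1','9'] word then
        st.2 ++ [pvCleanB (PySem.Chars.join [' '] (st.1 ++ [word]))]
      else st.2
    (if pvQualB word then st.1 ++ [word] else [], refList)
  (((PySem.Chars.split₀ content.toList).foldl step ([], [])).2).map String.mk

-- ===== PRECONDITION & SPEC =====
def Spec_extract_ref (content : String) (out : List String) : Prop := out = extract_ref_alt content
instance (content : String) (out : List String) : Decidable (Spec_extract_ref content out) := by unfold Spec_extract_ref; infer_instance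

-- ===== CLAIM (what is proved, stated in full; the proofs are below) =====
def Claim_equal_extract_ref : Prop := ∀ (content : String), Dom_extract_ref content → Spec_extract_ref content (extract_ref content)

-- ===== LEMMAS AND PROOFS =====

-- proof-only abbreviations
def pvRun (l : List (List Char)) : List (List Char) :=
  l.foldl (fun p w => if pvQualB w then p ++ [w] else []) []

def pvGlue (p : List (List Char)) (res : List Char) : List Char :=
  p.foldr (fun w acc => w ++ ' ' :: acc) res

def pvOuts : List (List Char) → List (List Char) → List (List Char)
  | _, [] => []
  | p, w :: rest =>
    (if PySem.Chars.isIn ['2','0'] w || PySem.Chars.isIn ['1','9'] w then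
        [pvCleanB (PySem.Chars.join [' '] (p ++ [w]))]
      else []) ++
    pvOuts (if pvQualB w then p ++ [w] else []) rest

theorem pvQualA_eq_B (w : List Char) : pvQualA w = pvQualB w := rfl

theorem pvCleanB_eq (res : List Char) :
    pvCleanB res = PySem.Chars.replace (PySem.Chars.replace (pvCleanLoopA res) ['('] []) ['&'] [','] := by
  fun_induction pvCleanLoopA res <;> rw [pvCleanB] <;> simp_all

theorem pvRun_take_succ (words : List (List Char)) (j : Nat) (hj : j < words.length) :
    pvRun (words.take (j+1)) =
      (if pvQualB words[j] then pvRun (words.take j) ++ [words[j]] else []) := by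
  rw [List.take_succ, pvRun, List.foldl_append]
  simp [pvRun, List.getElem?_eq_getElem hj]

theorem pvGlue_append (p : List (List Char)) (w res : List Char) :
    pvGlue (p ++ [w]) res = pvGlue p (w ++ ' ' :: res) := by
  simp [pvGlue, List.foldr_append]

theorem pvJoin_eq_glue (p : List (List Char)) (w : List Char) :
    PySem.Chars.join [' '] (p ++ [w]) = pvGlue p w := by
  induction p with
  | nil => simp [pvGlue, PySem.Chars.join_singleton]
  | cons x p ih =>
    cases p with
    | nil =>
      simp [PySem.Chars.join_cons_cons, PySem.Chars.join_singleton, pvGlue]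
    | cons y q =>
      rw [show (x :: y :: q) ++ [w] = x :: y :: (q ++ [w]) from rfl,
          PySem.Chars.join_cons_cons,
          show y :: (q ++ [w]) = (y :: q) ++ [w] from rfl, ih]
      simp [pvGlue]

theorem pvGetRefLoopA_eq (words : List (List Char)) (j : Nat) (hj : j ≤ words.length)
    (res : List Char) :
    pvGetRefLoopA words j res = pvGlue (pvRun (words.take j)) res := by
  induction j generalizing res with
  | zero => simp [pvGetRefLoopA, pvRun, pvGlue]
  | succ j ih =>
    have hj' : j < words.length := by omega
    rw [pvGetRefLoopA]
    have hw : (PySem.List.pyGet? words (j : Int)).getD [] = words[j] := by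
      simp [PySem.List.pyGetD_natCast]
      simp [PySem.List.pyGet?, PySem.List.pyIdx?, hj']
    rw [hw, pvRun_take_succ words j hj', pvQualA_eq_B]
    by_cases hq : pvQualB words[j]
    · simp only [hq, if_pos]
      rw [ih (by omega), pvGlue_append]
    · simp [hq, pvGlue]

theorem pvGetRefA_eq (words : List (List Char)) (j : Nat) (hj : j < words.length) :
    pvGetRefA words j =
      pvCleanB (PySem.Chars.join [' '] (pvRun (words.take j) ++ [words[j]])) := by
  have hw : (PySem.List.pyGet? words (j : Int)).getD [] = words[j] := by
    simp [PySem.List.pyGet?, PySem.List.pyIdx?, hj]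
  rw [pvGetRefA, pvCleanB_eq, pvJoin_eq_glue, hw,
      pvGetRefLoopA_eq words j (by omega) words[j]]

theorem pvGetD_words (words : List (List Char)) (j : Nat) (hj : j < words.length) :
    (PySem.List.pyGet? words (j : Int)).getD [] = words[j] := by
  simp [PySem.List.pyGet?, PySem.List.pyIdx?, hj]

-- B's fold produces pvOuts
theorem pvFoldB_outs (rest : List (List Char)) (p acc : List (List Char)) :
    (rest.foldl (fun st word =>
      (if pvQualB word then st.1 ++ [word] else [],
       if PySem.Chars.isIn ['2','0'] word || PySem.Chars.isIn ['1','9'] word then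
         st.2 ++ [pvCleanB (PySem.Chars.join [' '] (st.1 ++ [word]))]
       else st.2)) (p, acc)).2 = acc ++ pvOuts p rest := by
  induction rest generalizing p acc with
  | nil => simp [pvOuts]
  | cons w rest ih =>
    rw [List.foldl_cons, ih, pvOuts]
    by_cases hy : (PySem.Chars.isIn ['2','0'] w || PySem.Chars.isIn ['1','9'] w) = true <;>
      simp [hy]

-- A's indexed fold produces pvOuts as well
theorem pvFoldA_outs (words : List (List Char)) (d k : Nat) (hd : words.length - k = d)
    (hk : k ≤ words.length) (acc : List (List Char)) :
    ((PySem.List.pyRange (k : Int) (words.length : Int) 1).foldl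
      (fun acc i =>
        if PySem.Chars.isIn ['2','0'] ((PySem.List.pyGet? words i).getD []) ||
           PySem.Chars.isIn ['1','9'] ((PySem.List.pyGet? words i).getD []) then
          acc ++ [pvGetRefA words i.toNat]
        else acc) acc)
    = acc ++ pvOuts (pvRun (words.take k)) (words.drop k) := by
  induction d generalizing k acc with
  | zero =>
    have hk' : k = words.length := by omega
    subst hk'
    rw [PySem.List.pyRange_one_eq_nil (le_refl _)]
    simp [pvOuts]
  | succ d ih =>
    have hklt : k < words.length := by omega
    rw [PySem.List.pyRange_one_cons (by exact_mod_cast hklt), List.foldl_cons]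
    simp only [pvGetD_words words k hklt]
    have hdrop : words.drop k = words[k] :: words.drop (k+1) :=
      List.drop_eq_getElem_cons hklt
    rw [hdrop, pvOuts]
    have htn : ((k : Int)).toNat = k := by simp
    rw [htn, pvGetRefA_eq words k hklt]
    have hcast : ((k : Int) + 1) = ((k + 1 : Nat) : Int) := by push_cast; ring
    have hrun := pvRun_take_succ words k hklt
    by_cases hy : (PySem.Chars.isIn ['2','0'] words[k] || PySem.Chars.isIn ['1','9'] words[k]) = true
    · rw [if_pos hy, if_pos hy, hcast, ih (k+1) (by omega) (by omega), hrun]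
      simp
    · rw [if_neg hy, if_neg hy, hcast, ih (k+1) (by omega) (by omega), hrun]
      simp

-- ===== VERDICT (by name: the statement is the Claim_ definition above) =====
theorem extract_ref_spec : Claim_equal_extract_ref := by
  intro content _
  show extract_ref content = extract_ref_alt content
  simp only [extract_ref, extract_ref_alt]
  have hA := pvFoldA_outs (PySem.Chars.split₀ content.toList) _ 0 rfl (by omega) []
  have hB := pvFoldB_outs (PySem.Chars.split₀ content.toList) [] []
  simp only [Nat.cast_zero] at hA
  rw [hA, hB]
  simp [pvRun]
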